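-- pv_equiv track=rewrite | github.com/JJineu/AlgorithmStudy_Jungle | 0603/해인_거리두기확인하기3.py | bfs
-- ===== SOURCE A (Python) =====
-- from collections import deque
--
-- def bfs(place):
--     start = []
--     # place ["POOOP", "OXXOX", "OPXPX", "OOXOX", "POXXP"]
--     for i in range(5):
--         for j in range(5):
--             if place[i][j] == 'P':
--                 start.append([i, j]) # 각 대기실별 탐색이 필요한 P 시작점들을 start에 넣어두고 시작
--     # start [[0, 0], [0, 4], [2, 1], [2, 3], [4, 0], [4, 4]] [x좌표, y좌표]
--
--
--     for s in start:
--         queue = deque([s]) # 첫번째 P의 좌표를 넣어줌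
--         # 시작점별로 방문처리와 거리계산을 새로 해줘야 하므로
--         # for문 안에 visited와 distance를 둠
--         visited = [[False for _ in range(5)] for _ in range(5)]
--         distance = [[0 for _ in range(5)] for _ in range(5)]
--         queue.append((s[0], s[1]))
--         visited[s[0]][s[1]] = True
--
--         while queue:
--             y,  x = queue.popleft()
--             dx = [0, 0, -1, 1]
--             dy = [-1, 1, 0, 0]
--
--             for i in range(4):
--                 nx, ny = x + dx[i], y + dy[i]
--                 if 0 <= nx <= 4 and 0 <= ny <= 4 and visited[ny][nx] == False:
--                     if place[ny][nx] == "O":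
--                         queue.append([ny, nx])
--                         visited[ny][nx] = True
--                         distance[ny][nx] = distance[y][x] + 1
--                     elif place[ny][nx] == "P" and distance[y][x] <=  1:
--                         return False
--     return True
-- ===== SOURCE B (Python) =====
-- def bfs(place):
--     pts = [(i, j) for i in range(5) for j in range(5) if place[i][j] == 'P']
--
--     def at(i, j):
--         return place[i][j] if 0 <= i < 5 and 0 <= j < 5 else None
--
--     dirs = ((-1, 0), (1, 0), (0, -1), (0, 1))
--     for (i, j) in pts:
--         for (di, dj) in dirs:
--             c = at(i + di, j + dj)
--             if c == 'P':
--                 return False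
--             if c == 'O':
--                 for (ei, ej) in dirs:
--                     ni, nj = i + di + ei, j + dj + ej
--                     if (ni, nj) != (i, j) and at(ni, nj) == 'P':
--                         return False
--     return True
-- ===== Notes on version B (the rewrite author's own statement) =====
-- stated objective: simpler
-- what changed: A runs a BFS with queue/visited/distance grids from every 'P' cell; B collects the 'P' cells once and directly inspects each one's fixed neighborhood (an orthogonal 'P', or an orthogonal 'O' that has a further 'P' neighbour), keeping no search state at all.
import Mathlib
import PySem

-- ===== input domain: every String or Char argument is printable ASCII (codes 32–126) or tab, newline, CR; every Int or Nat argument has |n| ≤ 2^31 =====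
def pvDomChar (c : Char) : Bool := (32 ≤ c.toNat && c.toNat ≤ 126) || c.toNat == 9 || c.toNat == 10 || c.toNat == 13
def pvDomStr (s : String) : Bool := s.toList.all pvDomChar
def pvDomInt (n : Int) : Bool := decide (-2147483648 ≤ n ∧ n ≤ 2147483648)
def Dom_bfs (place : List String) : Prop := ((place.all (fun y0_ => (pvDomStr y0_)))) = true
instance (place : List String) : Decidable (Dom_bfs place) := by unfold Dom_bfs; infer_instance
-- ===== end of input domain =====

-- B replaces A's per-'P' breadth-first search (queue/visited/distance grids) by a direct
-- bounds-checked inspection of each 'P' cell's fixed neighborhood (objective: simpler).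

-- ===== PORT A =====

-- place[i][j] as a Char; the '#' default is reached only outside Pre_bfs (Python raises IndexError there)
def cellA (place : List String) (i j : Int) : Char :=
  (((PySem.List.pyGet? place i).map String.toList).bind (fun r => PySem.List.pyGet? r j)).getD '#'

-- grid read g[i][j] with default d (all reads in the ports are at indices the grids own, or guarded)
def get2 {α : Type} (d : α) (g : List (List α)) (i j : Int) : α :=
  ((PySem.List.pyGet? g i).bind (fun r => PySem.List.pyGet? r j)).getD d

-- grid assignment g[i][j] = a; both ports only use it with 0 ≤ i,j ≤ 4 on 5×5 grids, where it is exact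
def set2 {α : Type} (g : List (List α)) (i j : Int) (a : α) : List (List α) :=
  if 0 ≤ i ∧ 0 ≤ j then g.modify i.toNat (fun row => row.set j.toNat a) else g

-- the 5×5 shape of A's visited/distance grids (hypothesis carried for termination of the while loop)
def Shape {α : Type} (g : List (List α)) : Prop := g.length = 5 ∧ ∀ r ∈ g, r.length = 5

def falseCount (g : List (List Bool)) : Nat := (g.map (fun r => r.count false)).sum

-- A's BFS state: queue, visited, distance
structure BfsState where
  q : List (Int × Int)
  v : List (List Bool)
  d : List (List Int)

-- the four (dy, dx) pairs of A's dx/dy arrays, in loop order i = 0,1,2,3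
def dirsA : List (Int × Int) := [(-1, 0), (1, 0), (0, -1), (0, 1)]

-- body of A's `for i in range(4)` over a popped cell (y, x); `none` = `return False`
def innerA (place : List String) (y x : Int) : List (Int × Int) → BfsState → Option BfsState
  | [], st => some st
  | t :: rest, st =>
    if 0 ≤ x + t.2 ∧ x + t.2 ≤ 4 ∧ 0 ≤ y + t.1 ∧ y + t.1 ≤ 4 ∧
        get2 false st.v (y + t.1) (x + t.2) = false then
      if cellA place (y + t.1) (x + t.2) = 'O' then
        innerA place y x rest
          ⟨st.q ++ [(y + t.1, x + t.2)], set2 st.v (y + t.1) (x + t.2) true,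
           set2 st.d (y + t.1) (x + t.2) (get2 0 st.d y x + 1)⟩
      else if cellA place (y + t.1) (x + t.2) = 'P' ∧ get2 0 st.d y x ≤ 1 then none
      else innerA place y x rest st
    else innerA place y x rest st

theorem get2_nonneg {α : Type} (d : α) (g : List (List α)) (i j : Int)
    (hi : 0 ≤ i) (hj : 0 ≤ j) :
    get2 d g i j = ((g[i.toNat]?.bind (fun r => r[j.toNat]?)).getD d) := by
  unfold get2
  rw [PySem.List.pyGet?_of_nonneg _ hi]
  cases h : g[i.toNat]? with
  | none => rfl
  | some r => simp [PySem.List.pyGet?_of_nonneg _ hj]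

theorem set2_nonneg {α : Type} (g : List (List α)) (i j : Int) (a : α)
    (hi : 0 ≤ i) (hj : 0 ≤ j) :
    set2 g i j a = g.modify i.toNat (fun r => r.set j.toNat a) := by
  unfold set2
  rw [if_pos ⟨hi, hj⟩]

theorem shape_set2 {α : Type} (g : List (List α)) (i j : Int) (a : α) (h : Shape g) :
    Shape (set2 g i j a) := by
  unfold set2
  split
  · refine ⟨by simpa using h.1, ?_⟩
    intro r hr
    rw [List.mem_iff_getElem] at hr
    obtain ⟨k, hk, hkr⟩ := hr
    rw [List.getElem_modify] at hkr
    subst hkr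
    split
    · simpa using h.2 _ (List.getElem_mem _)
    · exact h.2 _ (List.getElem_mem _)
  · exact h

theorem falseCount_modify_set :
    ∀ (g : List (List Bool)) (n m : Nat) (hn : n < g.length) (hm : m < g[n].length),
      g[n][m] = false →
      falseCount (g.modify n (fun r => r.set m true)) < falseCount g := by
  intro g
  induction g with
  | nil => intro n m hn; exact absurd hn (by simp)
  | cons r g ih =>
    intro n m hn hm hf
    cases n with
    | zero =>
      rw [List.modify_zero_cons]
      simp only [List.getElem_cons_zero] at hf hm
      have hpos : 0 < r.count false :=
        List.count_pos_iff.mpr (by rw [← hf]; exact List.getElem_mem _)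
      have hc := List.count_set (a := true) (b := false) (l := r) (i := m) hm
      rw [hf] at hc
      simp only [falseCount, List.map_cons, List.sum_cons]
      simp only [beq_self_eq_true, if_true, beq_iff_eq, reduceCtorEq, if_false] at hc
      omega
    | succ n =>
      rw [List.modify_succ_cons]
      simp only [List.getElem_cons_succ] at hf hm
      have := ih n m (by simpa using hn) hm hf
      simp only [falseCount, List.map_cons, List.sum_cons]
      simp only [falseCount] at this
      omega

theorem falseCount_set2 (g : List (List Bool)) (i j : Int) (h : Shape g)
    (hi0 : 0 ≤ i) (hi4 : i ≤ 4) (hj0 : 0 ≤ j) (hj4 : j ≤ 4)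
    (hf : get2 false g i j = false) : falseCount (set2 g i j true) < falseCount g := by
  rw [set2_nonneg _ _ _ _ hi0 hj0]
  rw [get2_nonneg _ _ _ _ hi0 hj0] at hf
  have h1 : i.toNat < g.length := by rw [h.1]; omega
  have h2 : j.toNat < g[i.toNat].length := by
    rw [h.2 _ (List.getElem_mem _)]; omega
  rw [List.getElem?_eq_getElem h1] at hf
  simp only [Option.bind_some] at hf
  rw [List.getElem?_eq_getElem h2] at hf
  simp only [Option.getD_some] at hf
  exact falseCount_modify_set g i.toNat j.toNat h1 h2 hf

-- measure/shape facts about one pass of the inner loop (cited by bfsLoop's decreasing_by)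
theorem innerA_measure (place : List String) (y x : Int) :
    ∀ (ns : List (Int × Int)) (st st' : BfsState), Shape st.v →
      innerA place y x ns st = some st' →
      Shape st'.v ∧ st'.q.length + 2 * falseCount st'.v ≤ st.q.length + 2 * falseCount st.v := by
  intro ns
  induction ns with
  | nil =>
    intro st st' hv h
    cases h
    exact ⟨hv, le_refl _⟩
  | cons t rest ih =>
    intro st st' hv h
    rw [innerA] at h
    split at h
    · next hguard =>
      obtain ⟨hx2a, hx2b, hy2a, hy2b, hvf⟩ := hguard
      split at h
      · obtain ⟨hv', hm⟩ := ih _ _ (shape_set2 _ _ _ _ hv) h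
        refine ⟨hv', ?_⟩
        have hfc := falseCount_set2 st.v (y + t.1) (x + t.2) hv hy2a hy2b hx2a hx2b hvf
        simp only [List.length_append, List.length_cons, List.length_nil] at hm
        omega
      · split at h
        · cases h
        · exact ih _ _ hv h
    · exact ih _ _ hv h

-- A's `while queue:` loop
def bfsLoop (place : List String) (st : BfsState) (hv : Shape st.v) : Bool :=
  match hq : st.q with
  | [] => true
  | (y, x) :: rest =>
    match hi : innerA place y x dirsA ⟨rest, st.v, st.d⟩ with
    | none => false
    | some st' =>
      bfsLoop place st' (innerA_measure place y x dirsA ⟨rest, st.v, st.d⟩ st' hv hi).1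
termination_by st.q.length + 2 * falseCount st.v
decreasing_by
  have h := (innerA_measure place y x dirsA ⟨rest, st.v, st.d⟩ st' hv hi).2
  simp only at h
  rw [hq]
  simp only [List.length_cons]
  omega

-- A's start-collection double loop
def bfsCollect (place : List String) : List (Int × Int) :=
  (PySem.List.pyRange 0 5 1).foldl (fun acc i =>
    (PySem.List.pyRange 0 5 1).foldl (fun acc2 j =>
      if cellA place i j = 'P' then acc2 ++ [(i, j)] else acc2) acc) []

theorem initShape (s : Int × Int) :
    Shape (set2 (List.replicate 5 (List.replicate 5 false)) s.1 s.2 true) := by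
  refine shape_set2 _ _ _ _ ⟨by simp, ?_⟩
  intro r hr
  simp [List.eq_of_mem_replicate hr]

-- A's per-start state: queue = deque([s]) + append((s0,s1)), visited marked at s, distance all 0
def initState (s : Int × Int) : BfsState :=
  ⟨[s, s], set2 (List.replicate 5 (List.replicate 5 false)) s.1 s.2 true,
   List.replicate 5 (List.replicate 5 (0 : Int))⟩

-- A's `for s in start:` loop (a `return False` inside stops everything)
def bfsRun (place : List String) : List (Int × Int) → Bool
  | [] => true
  | s :: rest =>
    match bfsLoop place (initState s) (initShape s) with
    | false => false
    | true => bfsRun place rest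

def bfs (place : List String) : Bool := bfsRun place (bfsCollect place)

-- ===== PORT B =====

-- B's comprehension test place[i][j] == 'P'; the '?' default is reached only outside Pre_bfs
def cellB (place : List String) (i j : Int) : Char :=
  (((PySem.List.pyGet? place i).map String.toList).bind (fun r => PySem.List.pyGet? r j)).getD '?'

-- B's at(i, j): None when out of the 5×5 bounds; an in-bounds read of a short row is none
-- only outside Pre_bfs (Python raises IndexError there)
def atB (place : List String) (i j : Int) : Option Char :=
  if 0 ≤ i ∧ i < 5 ∧ 0 ≤ j ∧ j < 5 then
    ((PySem.List.pyGet? place i).map String.toList).bind (fun r => PySem.List.pyGet? r j)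
  else none

def dirsB : List (Int × Int) := [(-1, 0), (1, 0), (0, -1), (0, 1)]

-- B's pts comprehension
def collectB (place : List String) : List (Int × Int) :=
  (PySem.List.pyRange 0 5 1).flatMap (fun i =>
    ((PySem.List.pyRange 0 5 1).filter (fun j => cellB place i j = 'P')).map (fun j => (i, j)))

-- B's neighborhood inspection of one 'P' cell
def checkP (place : List String) (i j : Int) : Bool :=
  dirsB.all (fun t =>
    if atB place (i + t.1) (j + t.2) = some 'P' then false
    else if atB place (i + t.1) (j + t.2) = some 'O' then
      dirsB.all (fun e =>
        !(decide ((i + t.1 + e.1, j + t.2 + e.2) ≠ (i, j)) &&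
          decide (atB place (i + t.1 + e.1) (j + t.2 + e.2) = some 'P')))
    else true)

def bfs_alt (place : List String) : Bool := (collectB place).all (fun c => checkP place c.1 c.2)

-- ===== PRECONDITION & SPEC =====

-- Pre_ excludes exactly the inputs where A raises IndexError: fewer than 5 rows, or one of the
-- first five rows shorter than 5 characters.
def Pre_bfs (place : List String) : Prop :=
  5 ≤ place.length ∧ ∀ r ∈ place.take 5, 5 ≤ r.toList.length
instance (place : List String) : Decidable (Pre_bfs place) := by unfold Pre_bfs; infer_instance

def pvWitness_bfs : List String := ["POOOP", "OXXOX", "OOXPX", "OOXOX", "POXXO"]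

def Spec_bfs (place : List String) (out : Bool) : Prop := out = bfs_alt place
instance (place : List String) (out : Bool) : Decidable (Spec_bfs place out) := by
  unfold Spec_bfs; infer_instance

-- ===== CLAIM (what is proved, stated in full; the proofs are below) =====
def Claim_equal_bfs : Prop :=
  ∀ (place : List String), Dom_bfs place → Pre_bfs place → Spec_bfs place (bfs place)


-- ===== LEMMAS AND PROOFS =====

-- the shared meaning of a cell read: place[i][j] as an Option (none = IndexError / out of grid)
def cellOpt (place : List String) (i j : Int) : Option Char :=
  ((PySem.List.pyGet? place i).map String.toList).bind (fun r => PySem.List.pyGet? r j)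

def inbP (c : Int × Int) : Prop := 0 ≤ c.1 ∧ c.1 ≤ 4 ∧ 0 ≤ c.2 ∧ c.2 ≤ 4

-- fire test of one direction of A's inner loop (None = return False), over the pre-pass state
def fireB (place : List String) (v : List (List Bool)) (dc y x : Int) (t : Int × Int) : Bool :=
  decide (0 ≤ x + t.2 ∧ x + t.2 ≤ 4 ∧ 0 ≤ y + t.1 ∧ y + t.1 ≤ 4) &&
  !(get2 false v (y + t.1) (x + t.2)) &&
  decide (cellA place (y + t.1) (x + t.2) = 'P') && decide (dc ≤ 1)

-- enqueue test of one direction of A's inner loop, over the pre-pass state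
def newB (place : List String) (v : List (List Bool)) (y x : Int) (t : Int × Int) : Bool :=
  decide (0 ≤ x + t.2 ∧ x + t.2 ≤ 4 ∧ 0 ≤ y + t.1 ∧ y + t.1 ≤ 4) &&
  !(get2 false v (y + t.1) (x + t.2)) &&
  decide (cellA place (y + t.1) (x + t.2) = 'O')

def nbr (y x : Int) (t : Int × Int) : Int × Int := (y + t.1, x + t.2)

def markAll (v : List (List Bool)) (l : List (Int × Int)) : List (List Bool) :=
  l.foldl (fun g c => set2 g c.1 c.2 true) v

def setAllD (dG : List (List Int)) (l : List (Int × Int)) (a : Int) : List (List Int) :=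
  l.foldl (fun g c => set2 g c.1 c.2 a) dG

-- does the P cell c have an orthogonal in-bounds 'P' neighbour other than s?
def hasPn (place : List String) (s c : Int × Int) : Bool :=
  dirsA.any (fun t =>
    decide (0 ≤ c.1 + t.1 ∧ c.1 + t.1 ≤ 4 ∧ 0 ≤ c.2 + t.2 ∧ c.2 + t.2 ≤ 4) &&
    decide (cellA place (c.1 + t.1) (c.2 + t.2) = 'P') && decide ((c.1 + t.1, c.2 + t.2) ≠ s))

-- ---- small Bool/list helpers ----
theorem list_all_congr {α : Type} (l : List α) (f g : α → Bool) (h : ∀ x ∈ l, f x = g x) :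
    l.all f = l.all g := by
  induction l with
  | nil => rfl
  | cons a l ih =>
    simp only [List.all_cons, h a (by simp), ih (fun x hx => h x (by simp [hx]))]

theorem list_any_congr {α : Type} (l : List α) (f g : α → Bool) (h : ∀ x ∈ l, f x = g x) :
    l.any f = l.any g := by
  induction l with
  | nil => rfl
  | cons a l ih =>
    simp only [List.any_cons, h a (by simp), ih (fun x hx => h x (by simp [hx]))]

-- ---- grid lemmas ----


theorem get2_set2_self {α : Type} (d : α) (g : List (List α)) (i j : Int) (a : α)
    (hs : Shape g) (hi0 : 0 ≤ i) (hi4 : i ≤ 4) (hj0 : 0 ≤ j) (hj4 : j ≤ 4) :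
    get2 d (set2 g i j a) i j = a := by
  rw [set2_nonneg _ _ _ _ hi0 hj0, get2_nonneg _ _ _ _ hi0 hj0]
  have h1 : i.toNat < g.length := by rw [hs.1]; omega
  rw [List.getElem?_modify, List.getElem?_eq_getElem h1]
  have h2 : j.toNat < g[i.toNat].length := by
    rw [hs.2 _ (List.getElem_mem _)]; omega
  simp [List.getElem?_set_self h2]

theorem get2_set2_ne {α : Type} (d : α) (g : List (List α)) (i j i' j' : Int) (a : α)
    (hi : 0 ≤ i) (hj : 0 ≤ j) (hi' : 0 ≤ i') (hj' : 0 ≤ j')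
    (hne : (i, j) ≠ (i', j')) :
    get2 d (set2 g i j a) i' j' = get2 d g i' j' := by
  rw [set2_nonneg _ _ _ _ hi hj, get2_nonneg _ _ _ _ hi' hj', get2_nonneg _ _ _ _ hi' hj']
  rw [List.getElem?_modify]
  by_cases hii : i.toNat = i'.toNat
  · have hieq : i = i' := by omega
    have hjne : j ≠ j' := by intro h; exact hne (by rw [hieq, h])
    have hjj : j.toNat ≠ j'.toNat := by omega
    cases h : g[i'.toNat]? with
    | none => rfl
    | some r => simp [hii, List.getElem?_set_ne hjj]
  · cases h : g[i'.toNat]? with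
    | none => rfl
    | some r => simp [hii]

theorem get2_replicate {α : Type} (d : α) (n m : Nat) (i j : Int) :
    get2 d (List.replicate n (List.replicate m d)) i j = d := by
  unfold get2
  cases h : PySem.List.pyGet? (List.replicate n (List.replicate m d)) i with
  | none => rfl
  | some r =>
    have hr : r = List.replicate m d :=
      List.eq_of_mem_replicate (PySem.List.mem_of_pyGet?_eq_some _ h)
    subst hr
    cases h2 : PySem.List.pyGet? (List.replicate m d) j with
    | none => simp [h2]
    | some x =>
      have hx : x = d := List.eq_of_mem_replicate (PySem.List.mem_of_pyGet?_eq_some _ h2)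
      simp [h2, hx]

-- ---- markAll / setAllD characterisations ----
theorem shape_markAll (v : List (List Bool)) (l : List (Int × Int)) (h : Shape v) :
    Shape (markAll v l) := by
  induction l generalizing v with
  | nil => exact h
  | cons c l ih => exact ih _ (shape_set2 _ _ _ _ h)

theorem shape_setAllD (dG : List (List Int)) (l : List (Int × Int)) (a : Int) (h : Shape dG) :
    Shape (setAllD dG l a) := by
  induction l generalizing dG with
  | nil => exact h
  | cons c l ih => exact ih _ (shape_set2 _ _ _ _ h)

theorem get2_markAll (v : List (List Bool)) (l : List (Int × Int)) (c : Int × Int)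
    (hs : Shape v) (hl : ∀ m ∈ l, inbP m) (hc : inbP c) :
    get2 false (markAll v l) c.1 c.2 = if c ∈ l then true else get2 false v c.1 c.2 := by
  induction l generalizing v with
  | nil => simp [markAll]
  | cons m l ih =>
    have hm := hl m (by simp)
    have step : markAll v (m :: l) = markAll (set2 v m.1 m.2 true) l := rfl
    rw [step, ih _ (shape_set2 _ _ _ _ hs) (fun x hx => hl x (by simp [hx]))]
    by_cases hcl : c ∈ l
    · simp [hcl]
    · by_cases hcm : c = m
      · subst hcm
        simp [hcl, get2_set2_self _ _ _ _ _ hs hm.1 hm.2.1 hm.2.2.1 hm.2.2.2]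
      · have : (m.1, m.2) ≠ (c.1, c.2) := by
          intro h; exact hcm (by cases c; cases m; simp at h; simp [h])
        simp [hcl, hcm, get2_set2_ne _ _ _ _ _ _ _ hm.1 hm.2.2.1 hc.1 hc.2.2.1 this]

theorem get2_setAllD (dG : List (List Int)) (l : List (Int × Int)) (a : Int) (c : Int × Int)
    (hs : Shape dG) (hl : ∀ m ∈ l, inbP m) (hc : inbP c) :
    get2 0 (setAllD dG l a) c.1 c.2 = if c ∈ l then a else get2 0 dG c.1 c.2 := by
  induction l generalizing dG with
  | nil => simp [setAllD]
  | cons m l ih =>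
    have hm := hl m (by simp)
    have step : setAllD dG (m :: l) a = setAllD (set2 dG m.1 m.2 a) l a := rfl
    rw [step, ih _ (shape_set2 _ _ _ _ hs) (fun x hx => hl x (by simp [hx]))]
    by_cases hcl : c ∈ l
    · simp [hcl]
    · by_cases hcm : c = m
      · subst hcm
        simp [hcl, get2_set2_self _ _ _ _ _ hs hm.1 hm.2.1 hm.2.2.1 hm.2.2.2]
      · have : (m.1, m.2) ≠ (c.1, c.2) := by
          intro h; exact hcm (by cases c; cases m; simp at h; simp [h])
        simp [hcl, hcm, get2_set2_ne _ _ _ _ _ _ _ hm.1 hm.2.2.1 hc.1 hc.2.2.1 this]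

-- ---- one pass of the inner loop, characterised ----
theorem inner_char (place : List String) (y x : Int) (hyx : inbP (y, x)) :
    ∀ (ds : List (Int × Int)) (st : BfsState),
      (∀ t ∈ ds, t ≠ (0, 0)) → ds.Pairwise (· ≠ ·) →
      innerA place y x ds st =
        if ds.any (fireB place st.v (get2 0 st.d y x) y x) then none
        else some ⟨st.q ++ (ds.filter (newB place st.v y x)).map (nbr y x),
                   markAll st.v ((ds.filter (newB place st.v y x)).map (nbr y x)),
                   setAllD st.d ((ds.filter (newB place st.v y x)).map (nbr y x))
                     (get2 0 st.d y x + 1)⟩ := by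
  obtain ⟨hy0, hy4, hx0, hx4⟩ := hyx
  intro ds
  induction ds with
  | nil =>
    intro st _ _
    simp [innerA, markAll, setAllD]
  | cons t rest ih =>
    intro st h0 hp
    have ht0 : t ≠ (0, 0) := h0 t (by simp)
    have hrest0 : ∀ u ∈ rest, u ≠ (0, 0) := fun u hu => h0 u (by simp [hu])
    have hptl := (List.pairwise_cons.mp hp).2
    have hphd := (List.pairwise_cons.mp hp).1
    rw [innerA]
    split
    · next hguard =>
      obtain ⟨hx2a, hx2b, hy2a, hy2b, hvf⟩ := hguard
      have hnyx : ((y + t.1 : Int), (x + t.2 : Int)) ≠ (y, x) := by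
        intro hcontra
        apply ht0
        rw [Prod.mk.injEq] at hcontra ⊢
        constructor <;> omega
      by_cases hO : cellA place (y + t.1) (x + t.2) = 'O'
      · rw [if_pos hO]
        rw [ih _ hrest0 hptl]
        have hdc : get2 0 (set2 st.d (y + t.1) (x + t.2) (get2 0 st.d y x + 1)) y x
            = get2 0 st.d y x :=
          get2_set2_ne _ _ _ _ _ _ _ hy2a hx2a hy0 hx0 hnyx
        have hvpt : ∀ u ∈ rest,
            (decide (0 ≤ x + u.2 ∧ x + u.2 ≤ 4 ∧ 0 ≤ y + u.1 ∧ y + u.1 ≤ 4) = true) →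
            get2 false (set2 st.v (y + t.1) (x + t.2) true) (y + u.1) (x + u.2)
              = get2 false st.v (y + u.1) (x + u.2) := by
          intro u hu hb
          rw [decide_eq_true_iff] at hb
          refine get2_set2_ne _ _ _ _ _ _ _ hy2a hx2a (by omega) (by omega) ?_
          intro hcontra
          apply hphd u hu
          rw [Prod.mk.injEq] at hcontra
          cases t; cases u
          simp only [Prod.mk.injEq]
          constructor <;> omega
        have hfire : rest.any (fireB place (set2 st.v (y + t.1) (x + t.2) true)
              (get2 0 st.d y x) y x)
            = rest.any (fireB place st.v (get2 0 st.d y x) y x) := by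
          refine list_any_congr _ _ _ (fun u hu => ?_)
          unfold fireB
          by_cases hb : decide (0 ≤ x + u.2 ∧ x + u.2 ≤ 4 ∧ 0 ≤ y + u.1 ∧ y + u.1 ≤ 4) = true
          · rw [hvpt u hu hb]
          · rw [Bool.not_eq_true] at hb
            rw [hb]
            simp
        have hnew : rest.filter (newB place (set2 st.v (y + t.1) (x + t.2) true) y x)
            = rest.filter (newB place st.v y x) := by
          refine List.filter_congr (fun u hu => ?_)
          unfold newB
          by_cases hb : decide (0 ≤ x + u.2 ∧ x + u.2 ≤ 4 ∧ 0 ≤ y + u.1 ∧ y + u.1 ≤ 4) = true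
          · rw [hvpt u hu hb]
          · rw [Bool.not_eq_true] at hb
            rw [hb]
            simp
        have hheadf : fireB place st.v (get2 0 st.d y x) y x t = false := by
          unfold fireB
          rw [hO]
          simp
        have hheadn : newB place st.v y x t = true := by
          unfold newB
          rw [hO, hvf]
          simp
          omega
        rw [hdc, hfire, hnew]
        rw [List.any_cons, hheadf, Bool.false_or]
        rw [List.filter_cons_of_pos hheadn]
        split
        · rfl
        · congr 1
          simp only [List.map_cons]
          rw [List.append_assoc]
          rfl
      · rw [if_neg hO]
        by_cases hPF : cellA place (y + t.1) (x + t.2) = 'P' ∧ get2 0 st.d y x ≤ 1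
        · rw [if_pos hPF]
          have hheadf : fireB place st.v (get2 0 st.d y x) y x t = true := by
            unfold fireB
            rw [hvf, hPF.1]
            simp
            constructor
            · omega
            · exact hPF.2
          rw [List.any_cons, hheadf, Bool.true_or, if_pos rfl]
        · rw [if_neg hPF]
          rw [ih _ hrest0 hptl]
          have hheadf : fireB place st.v (get2 0 st.d y x) y x t = false := by
            unfold fireB
            rcases not_and_or.mp hPF with hP | hd
            · simp [hP]
            · simp [hd]
          have hheadn : newB place st.v y x t = false := by
            unfold newB
            simp [hO]
          rw [List.any_cons, hheadf, Bool.false_or, List.filter_cons_of_neg (by rw [hheadn]; simp)]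
    · next hguard =>
      rw [ih _ hrest0 hptl]
      have hor : decide (0 ≤ x + t.2 ∧ x + t.2 ≤ 4 ∧ 0 ≤ y + t.1 ∧ y + t.1 ≤ 4) = false
          ∨ get2 false st.v (y + t.1) (x + t.2) = true := by
        by_cases hb : (0 ≤ x + t.2 ∧ x + t.2 ≤ 4 ∧ 0 ≤ y + t.1 ∧ y + t.1 ≤ 4)
        · right
          rcases Bool.eq_false_or_eq_true (get2 false st.v (y + t.1) (x + t.2)) with htr | hf
          · exact htr
          · exact absurd ⟨hb.1, hb.2.1, hb.2.2.1, hb.2.2.2, hf⟩ hguard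
        · left
          simpa using hb
      have hheadf : fireB place st.v (get2 0 st.d y x) y x t = false := by
        unfold fireB
        rcases hor with hb | htr
        · rw [hb]; simp
        · rw [htr]; simp
      have hheadn : newB place st.v y x t = false := by
        unfold newB
        rcases hor with hb | htr
        · rw [hb]; simp
        · rw [htr]; simp
      rw [List.any_cons, hheadf, Bool.false_or, List.filter_cons_of_neg (by rw [hheadn]; simp)]

-- ---- loop invariant and the while-loop lemma ----
def qInv (st : BfsState) : Prop :=
  ∀ c ∈ st.q, inbP c ∧ get2 false st.v c.1 c.2 = true ∧ 1 ≤ get2 0 st.d c.1 c.2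

def vInv (place : List String) (s : Int × Int) (v : List (List Bool)) : Prop :=
  get2 false v s.1 s.2 = true ∧
  ∀ c : Int × Int, inbP c → get2 false v c.1 c.2 = true → c = s ∨ cellA place c.1 c.2 = 'O'

theorem bfsLoop_nil (place : List String) (st : BfsState) (hv : Shape st.v) (h : st.q = []) :
    bfsLoop place st hv = true := by
  rw [bfsLoop.eq_def]
  split
  · rfl
  · next hq => rw [h] at hq; cases hq

theorem bfsLoop_eq_false (place : List String) (st : BfsState) (hv : Shape st.v)
    (y x : Int) (rest : List (Int × Int)) (h : st.q = (y, x) :: rest)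
    (hi : innerA place y x dirsA ⟨rest, st.v, st.d⟩ = none) : bfsLoop place st hv = false := by
  rw [bfsLoop.eq_def]
  split
  · next hq => rw [hq] at h; cases h
  · next y' x' rest' hq =>
    rw [h] at hq
    injection hq with h1 h2
    injection h1 with hy hx
    subst hy; subst hx; subst h2
    split
    · rfl
    · next st' hi' => rw [hi] at hi'; cases hi'

theorem bfsLoop_eq_step (place : List String) (st st' : BfsState) (hv : Shape st.v)
    (hv' : Shape st'.v) (y x : Int) (rest : List (Int × Int)) (h : st.q = (y, x) :: rest)
    (hi : innerA place y x dirsA ⟨rest, st.v, st.d⟩ = some st') :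
    bfsLoop place st hv = bfsLoop place st' hv' := by
  rw [bfsLoop.eq_def]
  split
  · next hq => rw [hq] at h; cases h
  · next y' x' rest' hq =>
    rw [h] at hq
    injection hq with h1 h2
    injection h1 with hy hx
    subst hy; subst hx; subst h2
    split
    · next hi' => rw [hi] at hi'; cases hi'
    · next st'' hi' =>
      rw [hi] at hi'
      injection hi' with he
      subst he
      rfl

theorem fireB_iff (place : List String) (v : List (List Bool)) (dc y x : Int) (t : Int × Int) :
    fireB place v dc y x t = true ↔
      inbP (y + t.1, x + t.2) ∧ get2 false v (y + t.1) (x + t.2) = false ∧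
      cellA place (y + t.1) (x + t.2) = 'P' ∧ dc ≤ 1 := by
  unfold fireB inbP
  simp only [Bool.and_eq_true, decide_eq_true_eq, Bool.not_eq_true']
  constructor
  · rintro ⟨⟨⟨hb, hvv⟩, hP⟩, hd⟩
    exact ⟨⟨by omega, by omega, by omega, by omega⟩, hvv, hP, hd⟩
  · rintro ⟨hb, hvv, hP, hd⟩
    exact ⟨⟨⟨⟨by omega, by omega, by omega, by omega⟩, hvv⟩, hP⟩, hd⟩

theorem newB_iff (place : List String) (v : List (List Bool)) (y x : Int) (t : Int × Int) :
    newB place v y x t = true ↔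
      inbP (y + t.1, x + t.2) ∧ get2 false v (y + t.1) (x + t.2) = false ∧
      cellA place (y + t.1) (x + t.2) = 'O' := by
  unfold newB inbP
  simp only [Bool.and_eq_true, decide_eq_true_eq, Bool.not_eq_true']
  constructor
  · rintro ⟨⟨hb, hvv⟩, hO⟩
    exact ⟨⟨by omega, by omega, by omega, by omega⟩, hvv, hO⟩
  · rintro ⟨hb, hvv, hO⟩
    exact ⟨⟨⟨by omega, by omega, by omega, by omega⟩, hvv⟩, hO⟩

theorem hasPn_iff (place : List String) (s c : Int × Int) :
    hasPn place s c = true ↔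
      ∃ t ∈ dirsA, inbP (c.1 + t.1, c.2 + t.2) ∧
        cellA place (c.1 + t.1) (c.2 + t.2) = 'P' ∧ (c.1 + t.1, c.2 + t.2) ≠ s := by
  unfold hasPn inbP
  simp only [List.any_eq_true, Bool.and_eq_true, decide_eq_true_eq]
  constructor
  · rintro ⟨t, ht, ⟨⟨hb, hP⟩, hne⟩⟩
    exact ⟨t, ht, ⟨by omega, by omega, by omega, by omega⟩, hP, hne⟩
  · rintro ⟨t, ht, hb, hP, hne⟩
    exact ⟨t, ht, ⟨⟨⟨by omega, by omega, by omega, by omega⟩, hP⟩, hne⟩⟩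

theorem loopL (place : List String) (s : Int × Int) (hs : inbP s) :
    ∀ (N : Nat) (st : BfsState) (hv : Shape st.v),
      st.q.length + 2 * falseCount st.v ≤ N → Shape st.d → qInv st → vInv place s st.v →
      bfsLoop place st hv =
        st.q.all (fun c => !(decide (get2 0 st.d c.1 c.2 ≤ 1) && hasPn place s c)) := by
  intro N
  induction N with
  | zero =>
    intro st hv hN hd hq hvi
    rcases hqe : st.q with _ | ⟨c, rest⟩
    · rw [bfsLoop_nil _ _ _ hqe]
      rfl
    · rw [hqe] at hN
      simp at hN
  | succ N ihN =>
    intro st hv hN hd hq hvi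
    rcases hqe : st.q with _ | ⟨⟨y, x⟩, rest⟩
    · rw [bfsLoop_nil _ _ _ hqe]
      rfl
    · have hmem : ((y, x) : Int × Int) ∈ st.q := by rw [hqe]; simp
      have hyx : inbP (y, x) := (hq _ hmem).1
      have hyv : get2 false st.v y x = true := (hq _ hmem).2.1
      have hyd : 1 ≤ get2 0 st.d y x := (hq _ hmem).2.2
      have hchar := inner_char place y x hyx dirsA ⟨rest, st.v, st.d⟩ (by decide) (by decide)
      simp only at hchar
      by_cases hfire : dirsA.any (fireB place st.v (get2 0 st.d y x) y x) = true
      · rw [if_pos hfire] at hchar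
        rw [bfsLoop_eq_false place st hv y x rest hqe hchar]
        obtain ⟨t, ht, hft⟩ := List.any_eq_true.mp hfire
        obtain ⟨hbt, hvt, hPt, hdt⟩ := (fireB_iff _ _ _ _ _ _).mp hft
        have hne : ((y + t.1 : Int), (x + t.2 : Int)) ≠ s := by
          intro hcontra
          have h1 := hvi.1
          rw [← hcontra] at h1
          simp only at h1
          rw [h1] at hvt
          cases hvt
        have hhp : hasPn place s (y, x) = true :=
          (hasPn_iff _ _ _).mpr ⟨t, ht, hbt, hPt, hne⟩
        rw [List.all_cons]
        simp only [hhp, decide_eq_true (by exact hdt : get2 0 st.d y x ≤ 1)]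
        simp
      · rw [if_neg hfire] at hchar
        set l := ((dirsA.filter (newB place st.v y x)).map (nbr y x)) with hl
        have hlinb : ∀ m ∈ l, inbP m := by
          intro m hm
          obtain ⟨t, htf, hmt⟩ := List.mem_map.mp hm
          obtain ⟨_, hnb⟩ := List.mem_filter.mp htf
          obtain ⟨hb, _, _⟩ := (newB_iff _ _ _ _ _).mp hnb
          rw [← hmt]
          exact hb
        have hlnv : ∀ m ∈ l, get2 false st.v m.1 m.2 = false := by
          intro m hm
          obtain ⟨t, htf, hmt⟩ := List.mem_map.mp hm
          obtain ⟨_, hnb⟩ := List.mem_filter.mp htf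
          obtain ⟨_, hv0, _⟩ := (newB_iff _ _ _ _ _).mp hnb
          rw [← hmt]
          exact hv0
        have hlO : ∀ m ∈ l, cellA place m.1 m.2 = 'O' := by
          intro m hm
          obtain ⟨t, htf, hmt⟩ := List.mem_map.mp hm
          obtain ⟨_, hnb⟩ := List.mem_filter.mp htf
          obtain ⟨_, _, hO⟩ := (newB_iff _ _ _ _ _).mp hnb
          rw [← hmt]
          exact hO
        have hmeas := innerA_measure place y x dirsA ⟨rest, st.v, st.d⟩ _ hv hchar
        have hv' : Shape (markAll st.v l) := shape_markAll _ _ hv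
        have hd' : Shape (setAllD st.d l (get2 0 st.d y x + 1)) := shape_setAllD _ _ _ hd
        rw [bfsLoop_eq_step place st _ hv hv' y x rest hqe hchar]
        have hq' : qInv ⟨rest ++ l, markAll st.v l, setAllD st.d l (get2 0 st.d y x + 1)⟩ := by
          intro c hc
          simp only at hc ⊢
          rcases List.mem_append.mp hc with hcr | hcl
          · have hcq := hq c (by rw [hqe]; simp [hcr])
            refine ⟨hcq.1, ?_, ?_⟩
            · rw [get2_markAll _ _ _ hv hlinb hcq.1]
              split <;> [rfl; exact hcq.2.1]
            · rw [get2_setAllD _ _ _ _ hd hlinb hcq.1]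
              split
              · omega
              · exact hcq.2.2
          · refine ⟨hlinb c hcl, ?_, ?_⟩
            · rw [get2_markAll _ _ _ hv hlinb (hlinb c hcl)]
              simp [hcl]
            · rw [get2_setAllD _ _ _ _ hd hlinb (hlinb c hcl)]
              simp only [if_pos hcl]
              omega
        have hvi' : vInv place s (markAll st.v l) := by
          constructor
          · rw [get2_markAll _ _ _ hv hlinb hs]
            split <;> [rfl; exact hvi.1]
          · intro c hcb hct
            rw [get2_markAll _ _ _ hv hlinb hcb] at hct
            by_cases hcl : c ∈ l
            · exact Or.inr (hlO c hcl)
            · rw [if_neg hcl] at hct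
              exact hvi.2 c hcb hct
        rw [ihN _ hv' (by
          have h1 : st.q.length = rest.length + 1 := by rw [hqe]; rfl
          have h2 := hmeas.2
          simp only at h2 ⊢
          omega) hd' hq' hvi']
        simp only [List.all_append]
        have hltrue : l.all (fun c =>
            !(decide (get2 0 (setAllD st.d l (get2 0 st.d y x + 1)) c.1 c.2 ≤ 1) &&
              hasPn place s c)) = true := by
          rw [List.all_eq_true]
          intro c hcl
          rw [get2_setAllD _ _ _ _ hd hlinb (hlinb c hcl), if_pos hcl]
          have : ¬ (get2 0 st.d y x + 1 ≤ 1) := by omega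
          simp [this]
        have hrest : rest.all (fun c =>
            !(decide (get2 0 (setAllD st.d l (get2 0 st.d y x + 1)) c.1 c.2 ≤ 1) &&
              hasPn place s c))
            = rest.all (fun c => !(decide (get2 0 st.d c.1 c.2 ≤ 1) && hasPn place s c)) := by
          refine list_all_congr _ _ _ (fun c hcr => ?_)
          have hcq := hq c (by rw [hqe]; simp [hcr])
          have hcnl : c ∉ l := by
            intro hcl
            rw [hlnv c hcl] at hcq
            cases hcq.2.1
          rw [get2_setAllD _ _ _ _ hd hlinb hcq.1, if_neg hcnl]
        rw [hltrue, hrest, Bool.and_true, List.all_cons]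
        have hhead : (!(decide (get2 0 st.d y x ≤ 1) && hasPn place s (y, x))) = true := by
          by_cases hdc : get2 0 st.d y x ≤ 1
          · by_cases hhp : hasPn place s (y, x) = true
            · exfalso
              obtain ⟨t, ht, hbt, hPt, hne⟩ := (hasPn_iff _ _ _).mp hhp
              have hvn : get2 false st.v (y + t.1) (x + t.2) = false := by
                rcases Bool.eq_false_or_eq_true (get2 false st.v (y + t.1) (x + t.2))
                  with htr | hfa
                · rcases hvi.2 _ hbt htr with hes | hO
                  · exact absurd hes hne
                  · rw [hPt] at hO
                    cases hO
                · exact hfa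
              exact hfire (List.any_eq_true.mpr
                ⟨t, ht, (fireB_iff _ _ _ _ _ _).mpr ⟨hbt, hvn, hPt, hdc⟩⟩)
            · simp [Bool.not_eq_true] at hhp
              simp [hhp]
          · simp [hdc]
        rw [hhead, Bool.true_and]

-- ---- bridges between the two ports' cell tests ----
theorem cellA_eq_iff (place : List String) (i j : Int) (c : Char) (hc : c ≠ '#') :
    cellA place i j = c ↔ cellOpt place i j = some c := by
  unfold cellA cellOpt
  cases h : ((PySem.List.pyGet? place i).map String.toList).bind
      (fun r => PySem.List.pyGet? r j) with
  | none => simp [Ne.symm hc]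
  | some x => simp

theorem cellB_eq_iff (place : List String) (i j : Int) (c : Char) (hc : c ≠ '?') :
    cellB place i j = c ↔ cellOpt place i j = some c := by
  unfold cellB cellOpt
  cases h : ((PySem.List.pyGet? place i).map String.toList).bind
      (fun r => PySem.List.pyGet? r j) with
  | none => simp [Ne.symm hc]
  | some x => simp

theorem atB_eq_iff (place : List String) (i j : Int) (c : Char) :
    atB place i j = some c ↔ (0 ≤ i ∧ i ≤ 4 ∧ 0 ≤ j ∧ j ≤ 4) ∧ cellOpt place i j = some c := by
  unfold atB cellOpt
  split
  · next hcond => exact ⟨fun h => ⟨by omega, h⟩, fun h => h.2⟩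
  · next hcond => exact ⟨fun h => by simp at h, fun h => absurd (by omega : 0 ≤ i ∧ i < 5 ∧ 0 ≤ j ∧ j < 5) hcond⟩

theorem dirsB_eq : dirsB = dirsA := rfl

theorem atB_decide (place : List String) (i j : Int) (c : Char) (hc : c ≠ '#') :
    decide (atB place i j = some c)
      = (decide (0 ≤ i ∧ i ≤ 4 ∧ 0 ≤ j ∧ j ≤ 4) && decide (cellA place i j = c)) := by
  have hiff : (atB place i j = some c) ↔
      ((0 ≤ i ∧ i ≤ 4 ∧ 0 ≤ j ∧ j ≤ 4) ∧ cellA place i j = c) := by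
    rw [atB_eq_iff, cellA_eq_iff _ _ _ _ hc]
  by_cases h1 : (0 ≤ i ∧ i ≤ 4 ∧ 0 ≤ j ∧ j ≤ 4) <;>
    by_cases h2 : cellA place i j = c <;> simp [hiff, h1, h2]

-- ---- one start point: A's BFS equals B's neighbourhood inspection ----
set_option maxHeartbeats 2000000 in
theorem start_eval (place : List String) (s : Int × Int) (hs : inbP s)
    (hP : cellA place s.1 s.2 = 'P') :
    bfsLoop place (initState s) (initShape s) = checkP place s.1 s.2 := by
  obtain ⟨s1, s2⟩ := s
  simp only at hP ⊢
  obtain ⟨hs1a, hs1b, hs2a, hs2b⟩ := hs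
  simp only at hs1a hs1b hs2a hs2b
  have hshape0 : Shape (List.replicate 5 (List.replicate 5 false)) :=
    ⟨by simp, fun r hr => by simp [List.eq_of_mem_replicate hr]⟩
  have hshaped : Shape (List.replicate 5 (List.replicate 5 (0 : Int))) :=
    ⟨by simp, fun r hr => by simp [List.eq_of_mem_replicate hr]⟩
  set v0 := set2 (List.replicate 5 (List.replicate 5 false)) s1 s2 true with hv0def
  set d0 := List.replicate 5 (List.replicate 5 (0 : Int)) with hd0def
  have hv0shape : Shape v0 := shape_set2 _ _ _ _ hshape0
  have hv0s : get2 false v0 s1 s2 = true :=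
    get2_set2_self _ _ _ _ _ hshape0 hs1a hs1b hs2a hs2b
  have hv0ne : ∀ i j : Int, 0 ≤ i → 0 ≤ j → (i, j) ≠ (s1, s2) → get2 false v0 i j = false := by
    intro i j hi hj hne
    rw [hv0def, get2_set2_ne _ _ _ _ _ _ _ hs1a hs2a hi hj (by intro h; exact hne h.symm)]
    exact get2_replicate _ _ _ _ _
  have hd0 : ∀ i j : Int, get2 0 d0 i j = 0 := fun i j => get2_replicate _ _ _ _ _
  have hchar1 := inner_char place s1 s2 ⟨hs1a, hs1b, hs2a, hs2b⟩ dirsA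
    ⟨[(s1, s2)], v0, d0⟩ (by decide) (by decide)
  simp only [hd0] at hchar1
  have hPO : ∀ i j : Int, cellA place i j = 'O' → (i, j) ≠ (s1, s2) := by
    intro i j hO hcontra
    rw [Prod.mk.injEq] at hcontra
    rw [hcontra.1, hcontra.2, hP] at hO
    cases hO
  by_cases hF : dirsA.any (fireB place v0 0 s1 s2) = true
  · rw [if_pos hF] at hchar1
    rw [bfsLoop_eq_false place (initState (s1, s2)) (initShape (s1, s2)) s1 s2 [(s1, s2)] rfl hchar1]
    obtain ⟨t, ht, hft⟩ := List.any_eq_true.mp hF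
    obtain ⟨hbt, _, hPt, _⟩ := (fireB_iff _ _ _ _ _ _).mp hft
    symm
    have hat : atB place (s1 + t.1) (s2 + t.2) = some 'P' :=
      (atB_eq_iff _ _ _ _).mpr ⟨hbt, (cellA_eq_iff _ _ _ _ (by decide)).mp hPt⟩
    unfold checkP
    rw [List.all_eq_false]
    refine ⟨t, by rw [dirsB_eq]; exact ht, ?_⟩
    rw [if_pos hat]
    simp
  · rw [if_neg hF] at hchar1
    have hFf : ∀ t ∈ dirsA, fireB place v0 0 s1 s2 t = false := by
      intro t ht
      rcases Bool.eq_false_or_eq_true (fireB place v0 0 s1 s2 t) with h | h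
      · exact absurd (List.any_eq_true.mpr ⟨t, ht, h⟩) hF
      · exact h
    have hFeq : dirsA.any (fireB place v0 0 s1 s2) = false := by
      rcases Bool.eq_false_or_eq_true (dirsA.any (fireB place v0 0 s1 s2)) with h | h
      · exact absurd h hF
      · exact h
    set l0 := (dirsA.filter (newB place v0 s1 s2)).map (nbr s1 s2) with hl0def
    have hl0inb : ∀ m ∈ l0, inbP m := by
      intro m hm
      obtain ⟨t, htf, hmt⟩ := List.mem_map.mp hm
      obtain ⟨hb, _, _⟩ := (newB_iff _ _ _ _ _).mp (List.mem_filter.mp htf).2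
      rw [← hmt]
      exact hb
    have hl0nv : ∀ m ∈ l0, get2 false v0 m.1 m.2 = false := by
      intro m hm
      obtain ⟨t, htf, hmt⟩ := List.mem_map.mp hm
      obtain ⟨_, hv', _⟩ := (newB_iff _ _ _ _ _).mp (List.mem_filter.mp htf).2
      rw [← hmt]
      exact hv'
    have hl0O : ∀ m ∈ l0, cellA place m.1 m.2 = 'O' := by
      intro m hm
      obtain ⟨t, htf, hmt⟩ := List.mem_map.mp hm
      obtain ⟨_, _, hO⟩ := (newB_iff _ _ _ _ _).mp (List.mem_filter.mp htf).2
      rw [← hmt]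
      exact hO
    have hl0ne : ((s1 : Int), (s2 : Int)) ∉ l0 := by
      intro hmem
      exact hPO s1 s2 (hl0O _ hmem) rfl
    set v1 := markAll v0 l0 with hv1def
    set d1 := setAllD d0 l0 (0 + 1) with hd1def
    have hv1shape : Shape v1 := shape_markAll _ _ hv0shape
    have hd1shape : Shape d1 := shape_setAllD _ _ _ hshaped
    have hv1get : ∀ c : Int × Int, inbP c →
        get2 false v1 c.1 c.2 = if c ∈ l0 then true else get2 false v0 c.1 c.2 :=
      fun c hc => get2_markAll _ _ _ hv0shape hl0inb hc
    have hd1get : ∀ c : Int × Int, inbP c →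
        get2 0 d1 c.1 c.2 = if c ∈ l0 then (0 + 1 : Int) else 0 := by
      intro c hc
      rw [hd1def, get2_setAllD _ _ _ _ hshaped hl0inb hc, hd0]
    have hstep1 : bfsLoop place (initState (s1, s2)) (initShape (s1, s2))
        = bfsLoop place ⟨[(s1, s2)] ++ l0, v1, d1⟩ hv1shape :=
      bfsLoop_eq_step place (initState (s1, s2)) ⟨[(s1, s2)] ++ l0, v1, d1⟩
        (initShape (s1, s2)) hv1shape s1 s2 [(s1, s2)] rfl hchar1
    have hd1s : get2 0 d1 s1 s2 = 0 := by
      rw [hd1get (s1, s2) ⟨hs1a, hs1b, hs2a, hs2b⟩, if_neg hl0ne]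
    have hchar2 := inner_char place s1 s2 ⟨hs1a, hs1b, hs2a, hs2b⟩ dirsA
      ⟨l0, v1, d1⟩ (by decide) (by decide)
    simp only [hd1s] at hchar2
    have hfire2 : dirsA.any (fireB place v1 0 s1 s2) = false := by
      rw [← hFeq]
      refine list_any_congr _ _ _ (fun t ht => ?_)
      unfold fireB
      by_cases hb : (0 ≤ s2 + t.2 ∧ s2 + t.2 ≤ 4 ∧ 0 ≤ s1 + t.1 ∧ s1 + t.1 ≤ 4)
      · have hbP : inbP (s1 + t.1, s2 + t.2) := ⟨by omega, by omega, by omega, by omega⟩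
        rw [hv1get _ hbP]
        by_cases hml : ((s1 + t.1 : Int), (s2 + t.2 : Int)) ∈ l0
        · rw [if_pos hml]
          have hO := hl0O _ hml
          simp only at hO
          have : decide (cellA place (s1 + t.1) (s2 + t.2) = 'P') = false := by
            simp [hO]
          rw [this]
          simp
        · rw [if_neg hml]
      · have : decide (0 ≤ s2 + t.2 ∧ s2 + t.2 ≤ 4 ∧ 0 ≤ s1 + t.1 ∧ s1 + t.1 ≤ 4) = false := by
          simpa using hb
        rw [this]
        simp
    rw [if_neg (by rw [hfire2]; simp)] at hchar2
    have hfilter2 : dirsA.filter (newB place v1 s1 s2) = [] := by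
      rw [List.filter_eq_nil_iff]
      intro t ht
      intro hnb
      obtain ⟨hb, hnv, hO⟩ := (newB_iff _ _ _ _ _).mp hnb
      rw [hv1get _ hb] at hnv
      split at hnv
      · cases hnv
      · next hml =>
        apply hml
        rw [hl0def]
        refine List.mem_map.mpr ⟨t, List.mem_filter.mpr ⟨ht, ?_⟩, rfl⟩
        exact (newB_iff _ _ _ _ _).mpr ⟨hb, hnv, hO⟩
    rw [hfilter2] at hchar2
    simp only [List.map_nil] at hchar2
    have hchar2' : innerA place s1 s2 dirsA ⟨l0, v1, d1⟩ = some ⟨l0, v1, d1⟩ := by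
      rw [hchar2]
      show some (⟨l0 ++ [], v1, d1⟩ : BfsState) = _
      rw [List.append_nil]
    have hstep2 : bfsLoop place ⟨[(s1, s2)] ++ l0, v1, d1⟩ hv1shape
        = bfsLoop place ⟨l0, v1, d1⟩ hv1shape :=
      bfsLoop_eq_step place ⟨[(s1, s2)] ++ l0, v1, d1⟩ ⟨l0, v1, d1⟩ hv1shape hv1shape
        s1 s2 l0 rfl hchar2'
    have hloop := loopL place (s1, s2) ⟨hs1a, hs1b, hs2a, hs2b⟩
      (l0.length + 2 * falseCount v1) ⟨l0, v1, d1⟩ hv1shape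
      (le_refl _) hd1shape
      (by
        intro c hc
        simp only at hc ⊢
        refine ⟨hl0inb c hc, ?_, ?_⟩
        · rw [hv1get c (hl0inb c hc), if_pos hc]
        · rw [hd1get c (hl0inb c hc), if_pos hc]
          omega)
      (by
        constructor
        · show get2 false v1 s1 s2 = true
          have h := hv1get (s1, s2) ⟨hs1a, hs1b, hs2a, hs2b⟩
          simp only at h
          rw [h]
          split <;> [rfl; exact hv0s]
        · intro c hcb hct
          simp only at hct
          show c = (s1, s2) ∨ cellA place c.1 c.2 = 'O'
          rw [hv1get c hcb] at hct
          by_cases hml : c ∈ l0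
          · exact Or.inr (hl0O c hml)
          · rw [if_neg hml] at hct
            by_cases hcs : c = (s1, s2)
            · exact Or.inl hcs
            · rw [hv0ne c.1 c.2 hcb.1 hcb.2.2.1 (by
                intro h
                apply hcs
                cases c
                simpa using h)] at hct
              cases hct)
    rw [hstep1, hstep2, hloop]
    simp only
    have hall : l0.all (fun c =>
        !(decide (get2 0 d1 c.1 c.2 ≤ 1) && hasPn place (s1, s2) c))
        = l0.all (fun c => !(hasPn place (s1, s2) c)) := by
      refine list_all_congr _ _ _ (fun c hc => ?_)
      rw [hd1get c (hl0inb c hc), if_pos hc]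
      simp
    rw [hall]
    -- now relate l0.all (!hasPn) with checkP
    rw [hl0def, List.all_map, List.all_filter]
    simp only [Function.comp]
    unfold checkP
    rw [dirsB_eq]
    refine (list_all_congr _ _ _ (fun t ht => ?_)).symm
    have ht0 : t ≠ (0, 0) := (by decide : ∀ u ∈ dirsA, u ≠ ((0 : Int), (0 : Int))) t ht
    have hns : ((s1 + t.1 : Int), (s2 + t.2 : Int)) ≠ (s1, s2) := by
      intro h
      apply ht0
      rw [Prod.mk.injEq] at h ⊢
      constructor <;> omega
    have hfB := hFf t ht
    by_cases hA : atB place (s1 + t.1) (s2 + t.2) = some 'P'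
    · exfalso
      obtain ⟨hb, hco⟩ := (atB_eq_iff _ _ _ _).mp hA
      have hcP : cellA place (s1 + t.1) (s2 + t.2) = 'P' :=
        (cellA_eq_iff _ _ _ _ (by decide)).mpr hco
      have hnv : get2 false v0 (s1 + t.1) (s2 + t.2) = false :=
        hv0ne _ _ (by omega) (by omega) hns
      rw [(fireB_iff _ _ _ _ _ _).mpr ⟨⟨by omega, by omega, by omega, by omega⟩, hnv, hcP,
        by omega⟩] at hfB
      cases hfB
    · rw [if_neg hA]
      by_cases hB : atB place (s1 + t.1) (s2 + t.2) = some 'O'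
      · rw [if_pos hB]
        obtain ⟨hb, hco⟩ := (atB_eq_iff _ _ _ _).mp hB
        have hcO : cellA place (s1 + t.1) (s2 + t.2) = 'O' :=
          (cellA_eq_iff _ _ _ _ (by decide)).mpr hco
        have hnv : get2 false v0 (s1 + t.1) (s2 + t.2) = false :=
          hv0ne _ _ (by omega) (by omega) (hPO _ _ hcO)
        have hnB : newB place v0 s1 s2 t = true :=
          (newB_iff _ _ _ _ _).mpr ⟨⟨by omega, by omega, by omega, by omega⟩, hnv, hcO⟩
        rw [hnB]
        simp only [Bool.not_true, Bool.false_or]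
        -- inner all vs !hasPn
        rw [show (!(hasPn place (s1, s2) (nbr s1 s2 t)))
            = dirsA.all (fun e => !(decide (0 ≤ (nbr s1 s2 t).1 + e.1 ∧ (nbr s1 s2 t).1 + e.1 ≤ 4 ∧
                0 ≤ (nbr s1 s2 t).2 + e.2 ∧ (nbr s1 s2 t).2 + e.2 ≤ 4) &&
              decide (cellA place ((nbr s1 s2 t).1 + e.1) ((nbr s1 s2 t).2 + e.2) = 'P') &&
              decide (((nbr s1 s2 t).1 + e.1, (nbr s1 s2 t).2 + e.2) ≠ (s1, s2)))) from by
            unfold hasPn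
            rw [List.all_eq_not_any_not]
            simp]
        refine list_all_congr _ _ _ (fun e he => ?_)
        congr 1
        rw [show (nbr s1 s2 t).1 = s1 + t.1 from rfl, show (nbr s1 s2 t).2 = s2 + t.2 from rfl]
        rw [atB_decide place _ _ 'P' (by decide)]
        cases hd1 : decide (0 ≤ s1 + t.1 + e.1 ∧ s1 + t.1 + e.1 ≤ 4 ∧
            0 ≤ s2 + t.2 + e.2 ∧ s2 + t.2 + e.2 ≤ 4) <;>
          cases hd2 : decide (cellA place (s1 + t.1 + e.1) (s2 + t.2 + e.2) = 'P') <;>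
          cases hd3 : decide ((s1 + t.1 + e.1, s2 + t.2 + e.2) ≠ (s1, s2)) <;> simp
      · rw [if_neg hB]
        have hnB : newB place v0 s1 s2 t = false := by
          rcases Bool.eq_false_or_eq_true (newB place v0 s1 s2 t) with h | h
          · exfalso
            obtain ⟨hb, hnv, hO⟩ := (newB_iff _ _ _ _ _).mp h
            exact hB ((atB_eq_iff _ _ _ _).mpr ⟨hb, (cellA_eq_iff _ _ _ _ (by decide)).mp hO⟩)
          · exact h
        rw [hnB]
        simp

-- ---- the start lists agree, and their members are in-bounds 'P' cells ----
theorem cellAB_P (place : List String) (i j : Int) :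
    (cellA place i j = 'P') ↔ (cellB place i j = 'P') := by
  rw [cellA_eq_iff _ _ _ _ (by decide), cellB_eq_iff _ _ _ _ (by decide)]

theorem inner_fold (place : List String) (i : Int) :
    ∀ (l : List Int) (acc : List (Int × Int)),
      l.foldl (fun acc2 j => if cellA place i j = 'P' then acc2 ++ [(i, j)] else acc2) acc
        = acc ++ (l.filter (fun j => cellB place i j = 'P')).map (fun j => (i, j)) := by
  intro l
  induction l with
  | nil => intro acc; simp
  | cons j l ih =>
    intro acc
    rw [List.foldl_cons]
    by_cases h : cellA place i j = 'P'
    · rw [if_pos h, ih, List.filter_cons_of_pos (by simp [(cellAB_P place i j).mp h]),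
        List.map_cons]
      simp
    · rw [if_neg h, ih, List.filter_cons_of_neg (by
        simp only [decide_eq_true_eq]
        intro hB
        exact h ((cellAB_P place i j).mpr hB))]

theorem outer_fold (place : List String) :
    ∀ (lo : List Int) (acc : List (Int × Int)),
      lo.foldl (fun acc i => (PySem.List.pyRange 0 5 1).foldl
          (fun acc2 j => if cellA place i j = 'P' then acc2 ++ [(i, j)] else acc2) acc) acc
        = acc ++ lo.flatMap (fun i =>
            ((PySem.List.pyRange 0 5 1).filter (fun j => cellB place i j = 'P')).map
              (fun j => (i, j))) := by
  intro lo
  induction lo with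
  | nil => intro acc; simp
  | cons i l ih =>
    intro acc
    rw [List.foldl_cons, inner_fold, ih, List.flatMap_cons, List.append_assoc]

theorem collect_eq (place : List String) : bfsCollect place = collectB place := by
  unfold bfsCollect collectB
  rw [outer_fold, List.nil_append]

theorem mem_collect (place : List String) (c : Int × Int) (h : c ∈ collectB place) :
    inbP c ∧ cellA place c.1 c.2 = 'P' := by
  unfold collectB at h
  rw [List.mem_flatMap] at h
  obtain ⟨i, hi, hc⟩ := h
  rw [List.mem_map] at hc
  obtain ⟨j, hj, hcj⟩ := hc
  rw [List.mem_filter] at hj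
  have hir := (PySem.List.mem_pyRange_one).mp hi
  have hjr := (PySem.List.mem_pyRange_one).mp hj.1
  have hP : cellA place i j = 'P' :=
    (cellAB_P place i j).mpr (by simpa using hj.2)
  rw [← hcj]
  exact ⟨⟨by omega, by omega, by omega, by omega⟩, hP⟩

theorem run_all (place : List String) (l : List (Int × Int)) :
    bfsRun place l = l.all (fun s => bfsLoop place (initState s) (initShape s)) := by
  induction l with
  | nil => rfl
  | cons s rest ih =>
    show (match bfsLoop place (initState s) (initShape s) with
      | false => false | true => bfsRun place rest) = _
    cases h : bfsLoop place (initState s) (initShape s) <;> simp [h, ih]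

-- ===== VERDICT (by name: the statement is the Claim_ definition above) =====
theorem bfs_spec : Claim_equal_bfs := by
  intro place _ _
  unfold Spec_bfs bfs bfs_alt
  rw [run_all, collect_eq]
  exact list_all_congr _ _ _ (fun c hc =>
    start_eval place c (mem_collect place c hc).1 (mem_collect place c hc).2)
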